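/- GENERATED by tools/from_farm_form.py from prooffarm-gif/accepted/DGifSlurp.8/Lemmas.lean (a worked proof of the farm's unit `DGifSlurp.8`,
   accepted by the verdict) — do not edit. -/
import Gif.Spec.Units.DGifSlurp_8
import Gif.Spec.AllSegs

/-!
  Lemmas for the unit `DGifSlurp.8` (THE HEAD OF THE ROW LOOP of an interlaced image, dgif_lib.c:1243-1254; a body segment of a
  protected function with the call of `DGifGetLine` in the middle). The segment is walked in TWO STEPS that meet at the call's
  return address 0x10a9a0 (`ret29`), with a private assertion there.

  Pure facts (no machine state):
      seg8_slot          what `GifOK` says of the last counted slot: the array and the raster are owned, the raster is a data object,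
                         `RasterBits = r`, `n = Width · Height`, `1 ≤ Width`, `1 ≤ Height`, `n < 2^31`
      seg8_ranges        where the array, the raster, gif and pv are, as numbers (for `v_side`, `u_same`, `u_omega`)
      seg8_far           the four objects are 64 bytes apart [FO2] (`Owns.far`)
      seg8_env_at_call   `Env.at_call` for the PRESENT heap and forest (`Hc`, `Fc` with `SameRegion H Hc`)
      seg8_row_addr      the row's address `r + Width · j` as the walker leaves it (`imul ; movsxd ; add`)
      seg8_row_inside, seg8_height_le, seg8_row_lt
                         the row lies inside the raster; `Height ≤ n`; the branch fact of `cmp ; jle` as `j < Height`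
      seg8_height_kept   `sp->ImageDesc.Height` through a footprint that misses the slot
      seg8_core_carry    `DGifSlurp.Core` through a step of the body (the six slots, the return address, the footprint)
      seg8_jump_addr, seg8_jump
                         `&InterlacedJumps[i]`, and `1 ≤ InterlacedJumps[i] ≤ 8` for `i ≤ 3` (`Consts.jumps`)
  The walks:
      seg8_AtRet29       the assertion at `ret29`
      seg8_head          0x10a96a … 0x10a9a0 (`RowHead` → `seg8_AtRet29`), or `Height ≤ j`: to 0x10a948 (`PassHead`, measure `a − 1`)
      seg8_tail          0x10a9a0 … 0x10a96a (`RowHead`, a smaller measure) or … 0x10a8ed (`Exit`, behind DGifDecreaseImageCounter)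
-/

open X86 X86.User Asan ProgX.Base ProgX.Base.Spec Gif.Spec

set_option maxRecDepth 4000
set_option maxHeartbeats 4000000

namespace Gif.Spec.DGifSlurp_8

/-- **What the state invariant says of the last counted slot** `s.arr + 56 · init.length` (`Last`, with the raster `(r, n)`): the array
and the raster are owned objects, the raster is a data object, the slot is inside the array's capacity, and `RasterAt`'s clauses
[SV3 SV4]. -/
theorem seg8_slot {Hc : Heap} {Fc : Forest} {R : Rd} {mem : Mem} {s : Saved} {init : List Img} {g : Img} {r n : Nat}
    (hok : GifOK Hc Fc R mem) (hl : DGifSlurp.Last Fc s init g) (hras : g.raster = some (r, n)) :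
    (s.arr, 56 * s.cap) ∈ Fc.owned ∧ (r, n) ∈ Fc.owned ∧ (r, n) ∈ Fc.datas ∧ init.length < s.cap ∧
    SavedImage.RasterBits mem (s.arr + 56 * init.length) = r ∧
    n = SavedImage.ImageDesc.Width mem (s.arr + 56 * init.length) *
      SavedImage.ImageDesc.Height mem (s.arr + 56 * init.length) ∧
    1 ≤ SavedImage.ImageDesc.Width mem (s.arr + 56 * init.length) ∧
    1 ≤ SavedImage.ImageDesc.Height mem (s.arr + 56 * init.length) ∧ n < 2 ^ 31 := by
  have hsv := hok.shape.saved
  rw [hl.saved] at hsv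
  obtain ⟨k1, k2, k3, k4, k5⟩ := hsv
  have hlen : s.imgs.length = init.length + 1 := by
    rw [hl.imgs, List.length_append]
    rfl
  have hlt : init.length < s.imgs.length := by omega
  have hget : s.imgs[init.length] = g := by
    have h1 := List.getElem_of_eq hl.imgs hlt
    rw [h1]
    simp only [List.getElem_append_right (Nat.le_refl _), Nat.sub_self, List.getElem_cons_zero]
  have himg := k5 init.length hlt
  rw [hget] at himg
  have hra := himg.raster
  rw [hras] at hra
  obtain ⟨r1, r2, r3, r4, r5⟩ := hra
  have hgin : g ∈ s.imgs := by
    rw [hl.imgs]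
    exact List.mem_append_right _ List.mem_cons_self
  refine ⟨?_, ?_, ?_, by omega, r1, r2, r3, r4, r5⟩
  · apply Forest.mem_owned_saved
    rw [hl.saved]
    exact List.mem_cons_self
  · apply Forest.mem_owned_saved
    rw [hl.saved]
    unfold Saved.objs
    apply List.mem_cons_of_mem
    apply List.mem_flatMap.mpr
    refine ⟨g, hgin, ?_⟩
    unfold Img.objs
    rw [hras]
    apply List.mem_append_left
    apply List.mem_append_right
    exact List.mem_cons_self
  · unfold Forest.datas
    apply List.mem_append_left
    apply List.mem_append_right
    rw [hl.saved]
    unfold Saved.datas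
    apply List.mem_flatMap.mpr
    refine ⟨g, hgin, ?_⟩
    unfold Img.datas
    rw [hras]
    apply List.mem_append_left
    apply List.mem_append_right
    exact List.mem_cons_self

/-- **Where the last slot's array, the raster, gif and pv are**, as numbers (what `v_side`, `u_same`, `u_omega` need). -/
theorem seg8_ranges {Hc : Heap} {Fc : Forest} {R : Rd} {mem mem₀ : Mem} {s : Saved} {init : List Img} {g : Img} {r n : Nat}
    (hok : GifOK Hc Fc R mem) (hheap : HeapOK Hc mem₀) (hbase : Hc.base = 0x800000) (hl : DGifSlurp.Last Fc s init g)
    (hras : g.raster = some (r, n)) :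
    (0x800040 ≤ s.arr ∧ s.arr + 56 * s.cap + 32 ≤ 0xC00000) ∧
    (0x800040 ≤ r ∧ r + n + 32 ≤ 0xC00000) ∧
    (0x800040 ≤ Fc.gif ∧ Fc.gif + 120 + 32 ≤ 0xC00000) ∧
    (0x800040 ≤ Fc.pv ∧ Fc.pv + 24936 + 32 ≤ 0xC00000) := by
  obtain ⟨m1, m2, _, _⟩ := seg8_slot hok hl hras
  have i1 := hok.owns.inside hheap m1
  have i2 := hok.owns.inside hheap m2
  have i3 := hok.owns.inside hheap (o := (Fc.gif, 120)) List.mem_cons_self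
  have i4 := hok.owns.inside hheap (o := (Fc.pv, 24936)) (List.mem_cons_of_mem _ List.mem_cons_self)
  simp only at i1 i2 i3 i4
  rw [hbase] at i1 i2 i3 i4
  refine ⟨⟨?_, ?_⟩, ⟨?_, ?_⟩, ⟨?_, ?_⟩, ⟨?_, ?_⟩⟩ <;> omega

/-- **The array, the raster, gif and pv are four different objects, 64 bytes apart** [FO2]. -/
theorem seg8_far {Hc : Heap} {Fc : Forest} {R : Rd} {mem mem₀ : Mem} {s : Saved} {init : List Img} {g : Img} {r n : Nat}
    (hok : GifOK Hc Fc R mem) (hheap : HeapOK Hc mem₀) (hl : DGifSlurp.Last Fc s init g)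
    (hras : g.raster = some (r, n)) :
    (s.arr + 56 * s.cap + 64 ≤ r ∨ r + n + 64 ≤ s.arr) ∧
    (s.arr + 56 * s.cap + 64 ≤ Fc.pv ∨ Fc.pv + 24936 + 64 ≤ s.arr) ∧
    (s.arr + 56 * s.cap + 64 ≤ Fc.gif ∨ Fc.gif + 120 + 64 ≤ s.arr) ∧
    (r + n + 64 ≤ Fc.pv ∨ Fc.pv + 24936 + 64 ≤ r) ∧
    (r + n + 64 ≤ Fc.gif ∨ Fc.gif + 120 + 64 ≤ r) := by
  obtain ⟨m1, m2, m3, _⟩ := seg8_slot hok hl hras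
  have hp := hok.owns.placed hheap
  have mg : (Fc.gif, 120) ∈ Fc.owned := List.mem_cons_self
  have mp : (Fc.pv, 24936) ∈ Fc.owned := List.mem_cons_of_mem _ List.mem_cons_self
  obtain ⟨d1, d2, d3⟩ := hp.structs_ne.2 (r, n) m3
  have ms : (s.arr, 56 * s.imgs.length) ∈ Fc.structs := by
    unfold Forest.structs
    apply List.mem_append_left
    apply List.mem_append_right
    rw [hl.saved]
    exact List.mem_cons_self
  obtain ⟨t1, t2⟩ := hp.structs_ne.1 _ ms
  have t3 := d3 _ ms
  simp only at d1 d2 t1 t2 t3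
  have f1 := hok.owns.far hheap m1 m2 (fun e => t3 (congrArg Prod.fst e))
  have f2 := hok.owns.far hheap m1 mp (fun e => t2 (congrArg Prod.fst e))
  have f3 := hok.owns.far hheap m1 mg (fun e => t1 (congrArg Prod.fst e))
  have f4 := hok.owns.far hheap m2 mp (fun e => d2 (congrArg Prod.fst e))
  have f5 := hok.owns.far hheap m2 mg (fun e => d1 (congrArg Prod.fst e))
  simp only at f1 f2 f3 f4 f5
  exact ⟨f1, f2, f3, f4, f5⟩

/-- **`Env` AT THE ENTRY OF A CALLEE, FOR THE PRESENT HEAP AND FOREST** (`Env.at_call` of Gif/Spec/FrameCarry.lean asks the entry's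
heap; in DGifSlurp the heap `Hc` and the forest `Fc` have changed: `SameRegion H Hc` gives the static clauses of `HeapPre`). -/
theorem seg8_env_at_call {H Hc : Heap} {rest : List Obj} {frames : List (Nat × FrameLayout)} {F Fc : Forest} {R : Rd}
    {e s : State} {base top lo : Nat} {Fl : FrameLayout} {mem : Mem} (henv : Env H rest frames F R e) (hreg : SameRegion H Hc)
    (hinv : HeapInv Hc rest ((base, Fl) :: frames) top mem) (hok : GifOK Hc Fc R mem)
    (hs : Mem.SameExcept [⟨lo, top⟩] mem s.mem) (hlo : 0x700000 ≤ lo) (htop : top ≤ (e.reg .rsp).toNat + 8)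
    (hsp : (s.reg .rsp).toNat + 8 ≤ top) (h8 : (s.reg .rsp).toNat % 8 = 0) (hlo' : 0x700000 ≤ (s.reg .rsp).toNat + 8) :
    Env Hc rest ((base, Fl) :: frames) Fc R s := by
  have hcur := henv.ctx.cursor_range henv.heap.inv.shadow
  have hhi := hinv.shadow.stack.hi
  have hoff := hinv.heap.offStack
  have hroom := hinv.heap.room
  have hun : ShadowUntouched mem s.mem := by
    apply hs.eqOn
    intro w hw
    have e := List.mem_singleton.mp hw
    rw [e]
    simp only
    omega
  have hinv' : HeapInv Hc rest ((base, Fl) :: frames) ((s.reg .rsp).toNat + 8) s.mem := by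
    refine (hinv.sameExcept hun hs ?_).lower hsp (by omega) hlo'
    intro w hw
    have e := List.mem_singleton.mp hw
    rw [e]
    left
    simp only
    omega
  refine ⟨⟨hinv', hreg.1.trans henv.heap.base, hreg.2.trans henv.heap.limit, henv.heap.text, henv.heap.offText⟩,
    henv.ctx.push base Fl, ?_⟩
  apply hok.sameExcept hinv.heap ⟨hcur.1, hcur.2.1⟩ hs
  intro w hw
  have e := List.mem_singleton.mp hw
  rw [e]
  apply Loose.stack hinv.heap
  · simp only
    omega
  · simp only
    omega
  · simp only
    omega



/-- **The row's address** `RasterBits + (int)(Width · j)` (`mov esi, edx ; imul esi, r13d ; movsxd rsi, esi ; add rsi, [r12 + 20H]`, as the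
walker leaves it): the product is an `int`, so nothing wraps. -/
theorem seg8_row_addr (x : Word) (ww r : Nat) (hp : ww * x.toNat < 2 ^ 31) (hww : ww < 2 ^ 31) (hx : x.toNat < 2 ^ 31)
    (hr : r + ww * x.toNat < 2 ^ 64) :
    (Word.ofBV (BitVec.signExtend 64 (BitVec.ofNat 32 ww * Word.part .w32 x)) + UInt64.ofNat r).toNat = r + ww * x.toNat := by
  have hprod : (BitVec.ofNat 32 ww * Word.part .w32 x).toNat = ww * x.toNat := by
    rw [BitVec.toNat_mul, BitVec.toNat_ofNat, ProgX.toNat_part32]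
    rw [Nat.mod_eq_of_lt (by omega : ww < 2 ^ 32), Nat.mod_eq_of_lt (by omega : x.toNat < 2 ^ 32)]
    exact Nat.mod_eq_of_lt (by omega)
  have hs := toNat_sext32 (BitVec.ofNat 32 ww * Word.part .w32 x) (by omega)
  rw [UInt64.toNat_add, hs, hprod, UInt64.toNat_ofNat']
  rw [Nat.mod_eq_of_lt (by omega : r < 2 ^ 64)]
  rw [Nat.mod_eq_of_lt (by omega)]
  omega


/-- **A row of the raster lies inside it**: `j < Height` gives `Width · j + Width ≤ Width · Height`. -/
theorem seg8_row_inside (ww hh j : Nat) (hj : j < hh) : ww * j + ww ≤ ww * hh := by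
  have h1 := Nat.mul_le_mul_left ww (Nat.succ_le_of_lt hj)
  rw [Nat.mul_succ] at h1
  exact h1

/-- **`Height ≤ Width · Height`** for a width of at least 1. -/
theorem seg8_height_le (ww hh : Nat) (hw : 1 ≤ ww) : hh ≤ ww * hh :=
  Nat.le_mul_of_pos_left hh hw

/-- **`sp->ImageDesc.Height` through a footprint that misses the slot.** -/
theorem seg8_height_kept {ws : List Span} {m m' : Mem} (hs : Mem.SameExcept ws m m') (slot : Nat) (hlt : slot + 56 < 2 ^ 64)
    (hd : ∀ w, w ∈ ws → slot + 56 ≤ w.lo ∨ w.hi ≤ slot) :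
    SavedImage.ImageDesc.Height m' slot = SavedImage.ImageDesc.Height m slot := by
  simp only [gfield]
  apply hs.rd (slot + 12) 4 (by omega)
  intro w hw
  have := hd w hw
  omega


/-- **`Core` THROUGH A STEP OF THE BODY**: `v` has `Core`, `v'` is a later state of the body (the body's stack pointer, `rbp` and `r14`
as they were) whose memory differs from `v`'s only below the body's stack pointer, in the heap's region and its shadow, and in the
cursor's `cur`; the reader did not go back. The six slots and the return address are read through the footprint
(`slot_sameExcept`), the footprint since the entry is extended (`Mem.SameExcept.step_same`). -/
theorem seg8_core_carry {cut cut' : Word} {H : Heap} {rest : List Obj} {frames : List (Nat × FrameLayout)} {F : Forest} {R : Rd}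
    {u₀ e : State} {ret : Word} {v v' : State} (hc : DGifSlurp.Core cut H rest frames F R u₀ e ret v)
    (hrip : v'.rip = cut') (hrsp : v'.reg .rsp = e.reg .rsp - 152) (hrbp : v'.reg .rbp = v.reg .rbp)
    (hr14 : v'.reg .r14 = v.reg .r14)
    (hs : Mem.SameExcept [⟨(e.reg .rsp).toNat - 848, (e.reg .rsp).toNat - 152⟩, ⟨0x800000, 0x1000020⟩, ⟨R.cur, R.cur + 8⟩]
      v.mem v'.mem)
    (hrem : Gif.Spec.rem R v'.mem ≤ Gif.Spec.rem R v.mem) (hcode : (conv u₀).code.In v'.mem) (habi : (conv u₀).inv v')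
    (hroom : 0x700000 + 848 ≤ (e.reg .rsp).toNat) (htop : (e.reg .rsp).toNat + 8 ≤ 0x800000)
    (hcur : (e.reg .rsp).toNat + 8 ≤ R.cur) :
    DGifSlurp.Core cut' H rest frames F R u₀ e ret v' := by
  have hslots : ∀ (off k : Nat), off ≤ 48 → k ≤ off → ∀ w, w ∈ ([⟨(e.reg .rsp).toNat - 848, (e.reg .rsp).toNat - 152⟩,
      ⟨0x800000, 0x1000020⟩, ⟨R.cur, R.cur + 8⟩] : List Span) →
      (e.reg .rsp).toNat - off + k ≤ w.lo ∨ w.hi ≤ (e.reg .rsp).toNat - off := by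
    intro off k ho hk w hw
    simp only [List.mem_cons, List.not_mem_nil, or_false] at hw
    rcases hw with rfl | rfl | rfl
    · simp only
      omega
    · simp only
      omega
    · simp only
      omega
  refine ⟨hc.entry, hc.pre, hrip, hrsp, hrbp.trans hc.rbp, hr14.trans hc.r14, ?_, ?_, ?_, ?_, ?_, ?_, ?_,
    Nat.le_trans hrem hc.rem, ?_, hcode, habi⟩
  · exact slot_sameExcept hs (e.reg .rsp) 8 8 _ (by omega) (by omega) hc.slot_r15 (hslots _ _ (by omega) (by omega))
  · exact slot_sameExcept hs (e.reg .rsp) 16 8 _ (by omega) (by omega) hc.slot_r14 (hslots _ _ (by omega) (by omega))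
  · exact slot_sameExcept hs (e.reg .rsp) 24 8 _ (by omega) (by omega) hc.slot_r13 (hslots _ _ (by omega) (by omega))
  · exact slot_sameExcept hs (e.reg .rsp) 32 8 _ (by omega) (by omega) hc.slot_r12 (hslots _ _ (by omega) (by omega))
  · exact slot_sameExcept hs (e.reg .rsp) 40 8 _ (by omega) (by omega) hc.slot_rbp (hslots _ _ (by omega) (by omega))
  · exact slot_sameExcept hs (e.reg .rsp) 48 8 _ (by omega) (by omega) hc.slot_rbx (hslots _ _ (by omega) (by omega))
  · rw [hs.readLE (e.reg .rsp) 8 (by omega) ?_]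
    · exact hc.slot_ra
    · intro w hw
      simp only [List.mem_cons, List.not_mem_nil, or_false] at hw
      rcases hw with rfl | rfl | rfl
      · simp only
        omega
      · simp only
        omega
      · simp only
        omega
  · apply hc.same.step_same hs
    intro w hw a h1 h2
    simp only [List.mem_cons, List.not_mem_nil, or_false] at hw
    rcases hw with rfl | rfl | rfl
    · refine ⟨_, List.mem_cons_self, ?_, ?_⟩
      · simp only at h1 ⊢
        omega
      · simp only at h2 ⊢
        omega
    · exact ⟨_, List.mem_cons_of_mem _ (List.mem_cons_of_mem _ List.mem_cons_self), h1, h2⟩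
    · exact ⟨_, List.mem_cons_of_mem _ (List.mem_cons_of_mem _ (List.mem_cons_of_mem _ List.mem_cons_self)), h1, h2⟩



/-- **At 10A9A0H (ret29), `DGifGetLine(gif, row, Width)` has returned**: `IR` (the same heap and forest: `Back`; `LZOK` again), the
loop's registers as at the row head (`r15 = i`, `r13 = j`, `r12 = sp`: callee-saved), the slot's `Height` as it was
(DGifGetLine's footprint misses the array), `j < Height` (the branch of 10A979H), and the result in `eax`. -/
structure seg8_AtRet29 (H : Heap) (rest : List Obj) (frames : List (Nat × FrameLayout)) (F : Forest) (R : Rd) (Hc : Heap)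
    (Fc : Forest) (m a b : Nat) (u₀ e : State) (ret : Word) (v : State) : Prop where
  ir : DGifSlurp.IR Gif.L.DGifSlurp.ret29 H rest frames F R Hc Fc m u₀ e ret v
  pass : (v.reg .r15).toNat + a = 4
  pass_pos : 1 ≤ a
  row_int : (v.reg .r13).toNat < 2 ^ 31
  row : SavedImage.ImageDesc.Height v.mem (v.reg .r12).toNat - (v.reg .r13).toNat = b
  row_lt : (v.reg .r13).toNat < SavedImage.ImageDesc.Height v.mem (v.reg .r12).toNat
  res : IsBool v

/-- **`j < Height`**: the branch fact of `cmp DWORD PTR [r12 + 0CH], r13d ; jle` not taken, for two non-negative `int`s. -/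
theorem seg8_row_lt (x : Word) (hh : Nat) (hx : x.toNat < 2 ^ 31) (hh31 : hh < 2 ^ 31)
    (h : ¬(BitVec.ofNat 32 hh).toInt ≤ (Word.part .w32 x).toInt) : x.toNat < hh := by
  have e1 : (BitVec.ofNat 32 hh).toNat = hh := toNat_ofNat32 hh (by omega)
  have e2 : (Word.part .w32 x).toNat = x.toNat % 2 ^ 32 := ProgX.toNat_part32 x
  have b1 : (BitVec.ofNat 32 hh).toNat < 2 ^ 31 := by omega
  have b2 : (Word.part .w32 x).toNat < 2 ^ 31 := by omega
  rw [toInt_le_iff_of_lt _ _ b1 b2, e1, e2] at h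
  omega

/-- **10A96AH … the call of DGifGetLine … 10A9A0H (ret29)** (dgif_lib.c:1243-1248). The checked load of `sp->ImageDesc.Height`
(inside the live SavedImages array), `cmp ; jle`: `Height ≤ j` (10A93CH): `add r15d, 1`, to the pass head with the measure `a − 1`.
Otherwise the checked load of `sp->ImageDesc.Width`, `rsi = RasterBits + (int)(Width · j)`, `rdi = gif`:
`DGifGetLine(gif, r + j · Width, Width)`; its precondition: `Env` for the present heap and forest (`seg8_env_at_call`), `LZOK`, the
row is a buffer inside the raster (`Owns.liveIn`, `Loose.data`, `HeapWin.live`) that does not meet pv (`seg8_far`). Behind the call: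
`Back` gives `At` again, the slot's `Height` is what it was (`seg8_height_kept`: the footprint misses the array). -/
theorem seg8_head (Lay : Layout) (hLay : Lay.hi = 0x1000000) (μ : Microarch) (hμ : UserX.MicroOK μ) (u₀ : State)
    (hcode : HasCodeNat Lay u₀ Gif.L.DGifSlurp.entry Gif.Code.code_DGifSlurp.nat Gif.L.DGifSlurp.size)
    (h_asan_load4_noabort : Asan.SmallCheck Lay μ ProgX.Base.WayInv (ProgX.Base.CodeOK u₀) [.rax, .rcx, .rdx] 4 ProgX.Base.L.__asan_load4_noabort.entry)
    (H : Heap) (rest : List Obj) (frames : List (Nat × FrameLayout)) (F : Forest) (R : Rd) (Hc : Heap) (Fc : Forest) (m a b : Nat)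
    (e : State) (ret : Word)
    (h_DGifGetLine : ∀ n, Calls Lay μ ProgX.Base.WayInv (ProgX.Base.conv u₀) Gif.L.DGifGetLine.entry
      (Gif.Spec.DGifGetLine.spec Hc rest (DGifSlurp.framesIn frames e) Fc R n))
    (v : State) (hat : DGifSlurp.RowHead H rest frames F R Hc Fc m a b u₀ e ret v) :
    ReachVia Lay μ ProgX.Base.WayInv v (fun w =>
      (∃ (a' : Nat), a' < a ∧ DGifSlurp.PassHead H rest frames F R Hc Fc m a' u₀ e ret w) ∨
      seg8_AtRet29 H rest frames F R Hc Fc m a b u₀ e ret w) := by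
  obtain ⟨hir, hpass, hpass_pos, hrow_int, hrow⟩ := hat
  obtain ⟨hatt, hlz, hlast, hlt⟩ := hir
  obtain ⟨hcore, hregion, hgif, hpv, hinv, hok⟩ := hatt
  have hlast0 := hlast
  obtain ⟨s, init, g, r, n, hl, hras, hr12⟩ := hlast
  have he := hcore.entry
  v_entry he
  obtain ⟨henv, hrdi, hcomplete⟩ := hcore.pre
  have w_rip := hcore.rip
  have c_rsp : v.reg .rsp = e.reg .rsp - 152 := hcore.rsp
  have c_rbp : v.reg .rbp = e.reg .rdi := hcore.rbp
  have w_kept : RegsKept [.rsp] v v := RegsKept.refl _ _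
  have w_eq : Mem.EqOn ProgX.Base.L.textLo ProgX.Base.L.textHi u₀.mem v.mem := ProgX.Base.conv_code_eqOn hcore.code
  have hdf := (show abiInv _ from hcore.abi).1
  have hmx := (show abiInv _ from hcore.abi).2
  have hsse := ProgX.Base.sseOK_of_abiInv hcore.abi
  have hcur := henv.ctx.cursor_range henv.heap.inv.shadow
  have hbase : Hc.base = 0x800000 := hregion.1.trans henv.heap.base
  -- the numbers
  obtain ⟨hra, hrr, hrg, hrp⟩ := seg8_ranges hok hinv.heap hbase hl hras
  obtain ⟨m_arr, m_ras, m_dat, hcap, f_r, f_n, f_w1, f_h1, f_n31⟩ := seg8_slot hok hl hras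
  have hfar := seg8_far hok hinv.heap hl hras
  obtain ⟨slot, hslot⟩ : ∃ slot, slot = s.arr + 56 * init.length := ⟨_, rfl⟩
  rw [← hslot] at hr12 f_r f_n f_w1 f_h1
  rw [hr12] at hrow
  obtain ⟨hh, hhdef⟩ : ∃ hh, hh = SavedImage.ImageDesc.Height v.mem slot := ⟨_, rfl⟩
  obtain ⟨ww, hwdef⟩ : ∃ ww, ww = SavedImage.ImageDesc.Width v.mem slot := ⟨_, rfl⟩
  rw [← hhdef, ← hwdef] at f_n
  rw [← hhdef] at f_h1 hrow
  rw [← hwdef] at f_w1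
  have hs1 : 0x800040 ≤ slot := by omega
  have hs2 : slot + 56 + 32 ≤ 0xC00000 := by omega
  have hhn : hh ≤ n := by
    rw [f_n]
    exact seg8_height_le ww hh f_w1
  have hwn : ww ≤ n := by
    rw [f_n]
    exact Nat.le_mul_of_pos_right ww f_h1
  have hsl : LiveIn (Hc.liveObjs ++ rest) (DGifSlurp.framesIn frames e) slot 56 :=
    hok.owns.liveIn m_arr rest _ (by simp only; omega) (by simp only; omega)
  have l_h : v.mem.readLE (v.reg .r12 + 12) 4 = hh := by
    rw [rd_eq_readLE v.mem _ (slot + 12) 4 (by u_omega), hhdef]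
    simp only [gfield]
  have l_w : v.mem.readLE (v.reg .r12 + 8) 4 = ww := by
    rw [rd_eq_readLE v.mem _ (slot + 8) 4 (by u_omega), hwdef]
    simp only [gfield]
  have l_r : v.mem.readLE (v.reg .r12 + 32) 8 = r := by
    rw [rd_eq_readLE v.mem _ (slot + 32) 8 (by u_omega), ← f_r]
    simp only [gfield]
  have hgl := h_DGifGetLine ww
  clear h_DGifGetLine
  u_walk hcode [hμ.vendor] until [Gif.L.DGifSlurp.ret29, Gif.L.DGifSlurp.at_10a948] span [ProgX.Base.L.textLo, ProgX.Base.L.textHi] side (v_side)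
  case check_10a96f =>
    -- dgif_lib.c:1243 the load of `sp->ImageDesc.Height`: inside the SavedImages array
    have hun : ShadowUntouched v.mem s_10a96f.mem := by v_untouched
    exact hsl.accSmall hinv.shadow hun _ 4 (by decide) (by u_omega) (by u_omega)
  case check_10a980 =>
    -- dgif_lib.c:1245 the load of `sp->ImageDesc.Width`
    have hun : ShadowUntouched v.mem s_10a980.mem := by v_untouched
    exact hsl.accSmall hinv.shadow hun _ 4 (by decide) (by u_omega) (by u_omega)
  case call_inv =>
    v_inv
  case pre_10a99b =>
    -- DGifGetLine'S PRECONDITION. `j < Height`: the branch of 10A979H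
    have hj : (v.reg .r13).toNat < hh := seg8_row_lt _ hh hrow_int (by omega) hbr_10a979
    -- the row `[r + Width · j, + Width)` lies inside the raster
    have hrowin := seg8_row_inside ww hh (v.reg .r13).toNat hj
    rw [← f_n] at hrowin
    obtain ⟨off, hoff⟩ : ∃ off, off = ww * (v.reg .r13).toNat := ⟨_, rfl⟩
    rw [← hoff] at hrowin
    have hrsi : (s_10a99b.reg .rsi).toNat = r + off := by
      rw [w_rsi, hoff]
      exact seg8_row_addr _ ww r (by omega) (by omega) hrow_int (by omega)
    -- the environment for the frame list with the own frame in front: only the return address was pushed since `v`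
    have hs : Mem.SameExcept [⟨(e.reg .rsp).toNat - 848, (e.reg .rsp).toNat - 152⟩] v.mem s_10a99b.mem := by
      rw [w_mem]
      u_same
    have henv' : Env Hc rest (DGifSlurp.framesIn frames e) Fc R s_10a99b := by
      refine seg8_env_at_call henv hregion hinv hok hs (by omega) (by omega) ?_ ?_ ?_
      · rw [w_rsp]
        u_omega
      · rw [w_rsp]
        u_omega
      · rw [w_rsp]
        u_omega
    have hlz' : LZOK s_10a99b.mem Fc.pv := by
      rw [hpv]
      apply hlz.sameExcept hs (by omega)
      intro w hw
      have e := List.mem_singleton.mp hw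
      rw [e]
      simp only
      omega
    have hbuf : BufOK Hc rest (DGifSlurp.framesIn frames e) Fc R (s_10a99b.reg .rsi).toNat ww := by
      rw [hrsi]
      refine ⟨?_, ?_, ?_, by omega⟩
      · exact hok.owns.liveIn m_ras rest _ (by simp only; omega) (by simp only; omega)
      · exact Loose.data hinv.heap hok.owns m_dat (by simp only; omega) (by simp only; omega)
      · exact HeapWin.live hinv.heap (hok.owns.live _ m_ras) (by simp only; omega) (by simp only; omega)
    refine ⟨henv', hlz', ?_, ?_, f_w1, by omega, hbuf, ?_⟩
    · rw [w_rdi, hgif]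
      exact hrdi
    · rw [w_rdx, toNat_ofBV_ofNat32 ww (by omega)]
      exact Nat.mod_eq_of_lt (by omega)
    · rw [hrsi]
      rcases hfar.2.2.2.1 with h1 | h1
      · left
        omega
      · right
        omega
  · -- 0x10a948 FROM 0x10a940 (dgif_lib.c:1241 `i++`): the pass is over, to the head of the pass loop with the measure `a - 1`
    -- the one store since `v`: the check call's return address
    obtain ⟨hinvA, hokA, hremA⟩ := store_stack hinv hok ⟨hcur.1, hcur.2.1⟩ (e.reg .rsp - 160) 8 1091956
      (by u_omega) (by u_omega)
    rw [← w_mem] at hinvA hokA hremA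
    have hs : Mem.SameExcept [⟨(e.reg .rsp).toNat - 848, (e.reg .rsp).toNat - 152⟩, ⟨0x800000, 0x1000020⟩,
        ⟨R.cur, R.cur + 8⟩] v.mem s_10a940.mem := by
      rw [w_mem]
      u_same
    have habi : (conv u₀).inv s_10a940 := by
      refine ProgX.Base.abiInv_of ?_ ?_
      · rw [w_flags]
        simp only [X86.User.df_setStatus]
        exact w_df_10a96f
      · rw [w_mxcsr]
        exact hmx
    have hcore1 : DGifSlurp.Core Gif.L.DGifSlurp.at_10a948 H rest frames F R u₀ e ret s_10a940 :=
      seg8_core_carry hcore w_rip w_rsp (w_kept.get .rbp rfl) (w_kept.get .r14 rfl) hs (Nat.le_of_eq hremA)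
        (ProgX.Base.conv_code_in w_eq) habi he_room he_top hcur.2.2
    have hs0 : Mem.SameExcept [⟨(e.reg .rsp).toNat - 848, (e.reg .rsp).toNat - 152⟩] v.mem s_10a940.mem := by
      rw [w_mem]
      u_same
    have hlz1 : LZOK s_10a940.mem F.pv := by
      apply hlz.sameExcept hs0 (by omega)
      intro w hw
      have e := List.mem_singleton.mp hw
      rw [e]
      simp only
      omega
    have hi3 : (v.reg .r15).toNat ≤ 3 := by omega
    refine ReachVia.done (Or.inl ⟨a - 1, by omega, ?_, ?_⟩)
    · refine ⟨⟨hcore1, hregion, hgif, hpv, hinvA, hokA⟩, hlz1, ?_, ?_⟩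
      · rw [w_kept.get .r12 rfl]
        exact hlast0
      · rw [hremA]
        exact hlt
    · rw [w_r15, ProgX.toNat_ofBV32, BitVec.toNat_add, ProgX.toNat_part32]
      have e1 : (1#32).toNat = 1 := rfl
      rw [e1]
      omega
  · -- 0x10a9a0 (ret29): DGifGetLine HAS RETURNED
    obtain ⟨hback, hlz', hres⟩ := w_post
    -- `j < Height` (the branch of 10A979H), the row's offset and address, as in the precondition
    have hj : (v.reg .r13).toNat < hh := seg8_row_lt _ hh hrow_int (by omega) hbr_10a979
    have hrowin := seg8_row_inside ww hh (v.reg .r13).toNat hj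
    rw [← f_n] at hrowin
    obtain ⟨off, hoff⟩ : ∃ off, off = ww * (v.reg .r13).toNat := ⟨_, rfl⟩
    rw [← hoff] at hrowin
    have hrsi : (s_10a99b.reg .rsi).toNat = r + off := by
      rw [w_rsi_10a99b, hoff]
      exact seg8_row_addr _ ww r (by omega) (by omega) hrow_int (by omega)
    have e_top : (s_10a99b.reg .rsp).toNat + 8 = (e.reg .rsp).toNat - 152 := by
      rw [w_rsp_10a99b]
      u_omega
    have hs0 : Mem.SameExcept [⟨(e.reg .rsp).toNat - 848, (e.reg .rsp).toNat - 152⟩] v.mem s_10a99b.mem := by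
      rw [w_mem_10a99b]
      u_same
    have hrem0 : Gif.Spec.rem R s_10a99b.mem = Gif.Spec.rem R v.mem := by
      apply rem_sameExcept hs0 (by omega)
      intro w hw
      have e := List.mem_singleton.mp hw
      rw [e]
      simp only
      omega
    -- the callee's footprint in terms of `v`
    v_after_call w_rsp_10a99b w_mem_10a99b
    rw [hrsi] at w_same
    -- the footprint of the step: fine (the row, pv, `gif.Error`, the cursor, the stack below) …
    have hsf : Mem.SameExcept [⟨(e.reg .rsp).toNat - 848, (e.reg .rsp).toNat - 152⟩, ⟨r + off, r + off + ww⟩,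
        ⟨Fc.pv, Fc.pv + 24936⟩, ⟨Fc.gif + 96, Fc.gif + 100⟩, ⟨R.cur, R.cur + 8⟩] v.mem s_10a99br.mem := by
      u_same
    -- … and coarse (what `Core.same` speaks of)
    have hs : Mem.SameExcept [⟨(e.reg .rsp).toNat - 848, (e.reg .rsp).toNat - 152⟩, ⟨0x800000, 0x1000020⟩,
        ⟨R.cur, R.cur + 8⟩] v.mem s_10a99br.mem := by
      u_same
    -- `sp->ImageDesc.Height` is what it was: the footprint misses the array (`Owns.far`)
    have hkept : SavedImage.ImageDesc.Height s_10a99br.mem slot = SavedImage.ImageDesc.Height v.mem slot := by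
      apply seg8_height_kept hsf slot (by omega)
      intro w hw
      simp only [List.mem_cons, List.not_mem_nil, or_false] at hw
      obtain ⟨g1, g2, g3, _, _⟩ := hfar
      rcases hw with rfl | rfl | rfl | rfl | rfl
      · simp only
        omega
      · simp only
        omega
      · simp only
        omega
      · simp only
        omega
      · simp only
        omega
    have hinv1 : HeapInv Hc rest (DGifSlurp.framesIn frames e) ((e.reg .rsp).toNat - 152) s_10a99br.mem := by
      rw [← e_top]
      exact hback.inv
    have hrem1 : Gif.Spec.rem R s_10a99br.mem ≤ Gif.Spec.rem R v.mem := by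
      rw [← hrem0]
      exact hback.rem
    have hcore1 : DGifSlurp.Core Gif.L.DGifSlurp.ret29 H rest frames F R u₀ e ret s_10a99br :=
      seg8_core_carry hcore w_rip w_rsp (w_kept.get .rbp rfl) (w_kept.get .r14 rfl) hs hrem1 w_code w_inv he_room he_top
        hcur.2.2
    refine ReachVia.done (Or.inr ?_)
    refine ⟨⟨⟨hcore1, hregion, hgif, hpv, hinv1, hback.ok⟩, ?_, ?_, ?_⟩, ?_, hpass_pos, ?_, ?_, ?_, hres⟩
    · rw [← hpv]
      exact hlz'
    · rw [w_kept.get .r12 rfl]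
      exact hlast0
    · exact Nat.lt_of_le_of_lt hrem1 hlt
    · rw [w_kept.get .r15 rfl]
      exact hpass
    · rw [w_kept.get .r13 rfl]
      exact hrow_int
    · rw [w_kept.get .r12 rfl, w_kept.get .r13 rfl, hr12, hkept, ← hhdef]
      exact hrow
    · rw [w_kept.get .r12 rfl, w_kept.get .r13 rfl, hr12, hkept, ← hhdef]
      exact hj



/-- **`&InterlacedJumps[i]`** (`movsxd rbx, r15d ; lea rdi, [rbx * 4 + 141300H]`, as the walker leaves it) for `i ≤ 3`. -/
theorem seg8_jump_addr (x : Word) (hx : x.toNat ≤ 3) : (x * 4 + 1315584).toNat = 1315584 + 4 * x.toNat := by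
  have e4 : (4 : Word).toNat = 4 := rfl
  have ec : (1315584 : Word).toNat = 1315584 := rfl
  rw [UInt64.toNat_add, UInt64.toNat_mul, e4, ec]
  omega

/-- **`InterlacedJumps[i]` is 8, 8, 4 or 2** (`Consts.jumps`) for `i ≤ 3`: between 1 and 8. -/
theorem seg8_jump {mem : Mem} (hc : Consts mem) (x : Word) (hx : x.toNat ≤ 3) :
    1 ≤ mem.readLE (x * 4 + 1315584) 4 ∧ mem.readLE (x * 4 + 1315584) 4 ≤ 8 := by
  rw [rd_eq_readLE mem _ (1315584 + 4 * x.toNat) 4 (seg8_jump_addr x hx)]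
  obtain ⟨j0, j1, j2, j3⟩ := hc.jumps
  have hcases : x.toNat = 0 ∨ x.toNat = 1 ∨ x.toNat = 2 ∨ x.toNat = 3 := by omega
  rcases hcases with h | h | h | h
  · rw [h]
    have e : rd mem (1315584 + 4 * 0) 4 = 8 := j0
    rw [e]
    omega
  · rw [h]
    have e : rd mem (1315584 + 4 * 1) 4 = 8 := j1
    rw [e]
    omega
  · rw [h]
    have e : rd mem (1315584 + 4 * 2) 4 = 4 := j2
    rw [e]
    omega
  · rw [h]
    have e : rd mem (1315584 + 4 * 3) 4 = 2 := j3
    rw [e]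
    omega

/-- **10A9A0H (ret29) … 10A96AH or 10A8EDH** (dgif_lib.c:1245-1254). `mov ebx, eax ; test eax, eax ; je`:
  GIF_ERROR (10A932H): `DGifDecreaseImageCounter(gif)` (its precondition: `Env`, the last counted image has no extension list), `jmp` to
  the epilogue: `Done` for the heap and forest of its post; every counted image is complete (`F'.imgs = init`, `Last.done`).
  GIF_OK: `rbx = i`, the checked load of `InterlacedJumps[i]` (`i ≤ 3`: inside the registered global, `Ctx.jumps`), `add r13d, …`
  (1 … 8: `seg8_jump`), `jmp` to the row head: `j + jump < 2^31` (`Height ≤ n < 2^24`), the measure `Height − (j + jump) < Height − j`. -/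
theorem seg8_tail (Lay : Layout) (hLay : Lay.hi = 0x1000000) (μ : Microarch) (hμ : UserX.MicroOK μ) (u₀ : State)
    (hcode : HasCodeNat Lay u₀ Gif.L.DGifSlurp.entry Gif.Code.code_DGifSlurp.nat Gif.L.DGifSlurp.size)
    (h_asan_load4_noabort : Asan.SmallCheck Lay μ ProgX.Base.WayInv (ProgX.Base.CodeOK u₀) [.rax, .rcx, .rdx] 4 ProgX.Base.L.__asan_load4_noabort.entry)
    (H : Heap) (rest : List Obj) (frames : List (Nat × FrameLayout)) (F : Forest) (R : Rd) (Hc : Heap) (Fc : Forest) (m a b : Nat)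
    (e : State) (ret : Word)
    (h_Dec : ∀ (init : List Img) (g : Img), Calls Lay μ ProgX.Base.WayInv (ProgX.Base.conv u₀) Gif.L.DGifDecreaseImageCounter.entry
      (Gif.Spec.DGifDecreaseImageCounter.spec Hc rest (DGifSlurp.framesIn frames e) Fc R init g))
    (v : State) (hat : seg8_AtRet29 H rest frames F R Hc Fc m a b u₀ e ret v) :
    ReachVia Lay μ ProgX.Base.WayInv v (fun w =>
      (∃ (b' : Nat), b' < b ∧ DGifSlurp.RowHead H rest frames F R Hc Fc m a b' u₀ e ret w) ∨
      DGifSlurp.Exit H rest frames F R u₀ e ret w) := by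
  obtain ⟨hir, hpass, hpass_pos, hrow_int, hrow, hrow_lt, hres⟩ := hat
  obtain ⟨hatt, hlz, hlast, hlt⟩ := hir
  obtain ⟨hcore, hregion, hgif, hpv, hinv, hok⟩ := hatt
  have hlast0 := hlast
  obtain ⟨s, init, g, r, n, hl, hras, hr12⟩ := hlast
  have he := hcore.entry
  v_entry he
  obtain ⟨henv, hrdi, hcomplete⟩ := hcore.pre
  have w_rip := hcore.rip
  have c_rsp : v.reg .rsp = e.reg .rsp - 152 := hcore.rsp
  have c_rbp : v.reg .rbp = e.reg .rdi := hcore.rbp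
  have w_kept : RegsKept [.rsp] v v := RegsKept.refl _ _
  have w_eq : Mem.EqOn ProgX.Base.L.textLo ProgX.Base.L.textHi u₀.mem v.mem := ProgX.Base.conv_code_eqOn hcore.code
  have hdf := (show abiInv _ from hcore.abi).1
  have hmx := (show abiInv _ from hcore.abi).2
  have hsse := ProgX.Base.sseOK_of_abiInv hcore.abi
  have hcur := henv.ctx.cursor_range henv.heap.inv.shadow
  have hbase : Hc.base = 0x800000 := hregion.1.trans henv.heap.base
  obtain ⟨z, c_rax⟩ : ∃ z, v.reg .rax = z := ⟨_, rfl⟩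
  have hi31 : (v.reg .r15).toNat < 2 ^ 31 := by omega
  have hdec := h_Dec init g
  clear h_Dec
  u_walk hcode [hμ.vendor, Gif.Spec.sext32_small (v.reg .r15) hi31] until [Gif.L.DGifSlurp.at_10a96a, Gif.L.DGifSlurp.at_10a8ed] span [ProgX.Base.L.textLo, ProgX.Base.L.textHi] side (v_side)
  case call_inv =>
    v_inv
  case pre_10a935 =>
    -- DGifDecreaseImageCounter'S PRECONDITION: the environment, gif, the last counted image has no extension list (EX3)
    have hs : Mem.SameExcept [⟨(e.reg .rsp).toNat - 848, (e.reg .rsp).toNat - 152⟩] v.mem s_10a935.mem := by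
      rw [w_mem]
      u_same
    have henv' : Env Hc rest (DGifSlurp.framesIn frames e) Fc R s_10a935 := by
      refine seg8_env_at_call henv hregion hinv hok hs (by omega) (by omega) ?_ ?_ ?_
      · rw [w_rsp]
        u_omega
      · rw [w_rsp]
        u_omega
      · rw [w_rsp]
        u_omega
    refine ⟨henv', ?_, ?_, hl.noext⟩
    · rw [w_rdi, hgif]
      exact hrdi
    · rw [Forest.imgs_some hl.saved]
      exact hl.imgs
  case check_10a9b1 =>
    -- dgif_lib.c:1244 the load of `InterlacedJumps[i]`, `i ≤ 3`: inside the registered global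
    have hun : ShadowUntouched v.mem s_10a9b1.mem := by v_untouched
    have haddr := seg8_jump_addr (v.reg .r15) (by omega)
    have hjl : LiveIn (Hc.liveObjs ++ rest) (DGifSlurp.framesIn frames e) (v.reg .r15 * 4 + 1315584).toNat 4 := by
      refine ⟨Gif.Globals.InterlacedJumps.obj, List.mem_append_right _ (List.mem_append_right _ henv.ctx.jumps), ?_, ?_⟩
      · show 0x141300 ≤ _
        omega
      · show _ ≤ 0x141300 + 16
        omega
    exact hjl.accSmall hinv.shadow hun _ 4 (by decide) (Nat.le_refl _) (Nat.le_refl _)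
  · -- 0x10a93a (ret25): DGifDecreaseImageCounter HAS RETURNED; `jmp` to the epilogue
    obtain ⟨H', F', hb2, hsbs, himgs, hremeq⟩ := w_post
    have e_top : (s_10a935.reg .rsp).toNat + 8 = (e.reg .rsp).toNat - 152 := by
      rw [w_rsp_10a935]
      u_omega
    have hs0 : Mem.SameExcept [⟨(e.reg .rsp).toNat - 848, (e.reg .rsp).toNat - 152⟩] v.mem s_10a935.mem := by
      rw [w_mem_10a935]
      u_same
    have hrem0 : Gif.Spec.rem R s_10a935.mem = Gif.Spec.rem R v.mem := by
      apply rem_sameExcept hs0 (by omega)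
      intro w hw
      have e := List.mem_singleton.mp hw
      rw [e]
      simp only
      omega
    v_after_call w_rsp_10a935 w_mem_10a935
    have hs : Mem.SameExcept [⟨(e.reg .rsp).toNat - 848, (e.reg .rsp).toNat - 152⟩, ⟨0x800000, 0x1000020⟩,
        ⟨R.cur, R.cur + 8⟩] v.mem s_10a935r.mem := by
      u_same
    have hinv1 : HeapInv H' rest (DGifSlurp.framesIn frames e) ((e.reg .rsp).toNat - 152) s_10a935r.mem := by
      rw [← e_top]
      exact hb2.inv
    have hrem1 : Gif.Spec.rem R s_10a935r.mem ≤ Gif.Spec.rem R v.mem := by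
      rw [← hrem0]
      exact hb2.rem
    have hcomp : F'.Complete := by
      apply (DGifSlurp.complete_iff_imgs F').mpr
      rw [himgs]
      exact hl.done
    have hrbp1 : s_10a935r.reg .rbp = v.reg .rbp := w_kept.get .rbp rfl
    have hr141 : s_10a935r.reg .r14 = v.reg .r14 := w_kept.get .r14 rfl
    have hdf1 : s_10a935r.flags .df = false := (show abiInv _ from w_inv).1
    clear w_same hs0
    u_walk hcode [hμ.vendor] until [Gif.L.DGifSlurp.at_10a8ed] span [ProgX.Base.L.textLo, ProgX.Base.L.textHi] side (v_side)
    -- 0x10a8ed: `Done` for the heap and the forest of DGifDecreaseImageCounter's post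
    have habi : (conv u₀).inv s_10a93a := by
      refine ProgX.Base.abiInv_of ?_ ?_
      · rw [w_flags]
        exact hdf1
      · rw [w_mxcsr]
        exact w_mx
    rw [← w_mem] at hs hinv1 hrem1
    have hok1 : GifOK H' F' R s_10a93a.mem := by
      rw [w_mem]
      exact hb2.ok
    have hcore1 : DGifSlurp.Core Gif.L.DGifSlurp.at_10a8ed H rest frames F R u₀ e ret s_10a93a :=
      seg8_core_carry hcore w_rip w_rsp (w_kept.get .rbp rfl) (w_kept.get .r14 rfl) hs hrem1
        (ProgX.Base.conv_code_in w_eq) habi he_room he_top hcur.2.2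
    refine ReachVia.done (Or.inr ⟨H', F', ⟨hcore1, hregion.trans hb2.region, ?_, ?_, hinv1, hok1⟩, hcomp⟩)
    · exact hsbs.1.trans hgif
    · exact hsbs.2.1.trans hpv
  · -- 0x10a96a FROM 0x10a9be (dgif_lib.c:1244 `j += InterlacedJumps[i]`): THE BACK EDGE of the row loop
    -- the numbers: `Height ≤ n < 2^24` (`Owns.inside` of the raster), the jump is between 1 and 8
    obtain ⟨hra, hrr, hrg, hrp⟩ := seg8_ranges hok hinv.heap hbase hl hras
    obtain ⟨m_arr, m_ras, m_dat, hcap, f_r, f_n, f_w1, f_h1, f_n31⟩ := seg8_slot hok hl hras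
    rw [← hr12] at f_n f_w1
    have hhn := seg8_height_le _ (SavedImage.ImageDesc.Height v.mem (v.reg .r12).toNat) f_w1
    rw [← f_n] at hhn
    obtain ⟨hj1, hj8⟩ := seg8_jump hok.shape.consts (v.reg .r15) (by omega)
    obtain ⟨jump, hjump⟩ : ∃ jump, jump = v.mem.readLE (v.reg .r15 * 4 + 1315584) 4 := ⟨_, rfl⟩
    rw [← hjump] at hj1 hj8 w_r13
    -- the one store since `v`: the check call's return address
    obtain ⟨hinvA, hokA, hremA⟩ := store_stack hinv hok ⟨hcur.1, hcur.2.1⟩ (e.reg .rsp - 160) 8 1092022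
      (by u_omega) (by u_omega)
    rw [← w_mem] at hinvA hokA hremA
    have hs : Mem.SameExcept [⟨(e.reg .rsp).toNat - 848, (e.reg .rsp).toNat - 152⟩, ⟨0x800000, 0x1000020⟩,
        ⟨R.cur, R.cur + 8⟩] v.mem s_10a9be.mem := by
      rw [w_mem]
      u_same
    have hs0 : Mem.SameExcept [⟨(e.reg .rsp).toNat - 848, (e.reg .rsp).toNat - 152⟩] v.mem s_10a9be.mem := by
      rw [w_mem]
      u_same
    have habi : (conv u₀).inv s_10a9be := by
      refine ProgX.Base.abiInv_of ?_ ?_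
      · rw [w_flags]
        simp only [X86.User.df_setStatus]
        exact w_df_10a9b1
      · rw [w_mxcsr]
        exact hmx
    have hcore1 : DGifSlurp.Core Gif.L.DGifSlurp.at_10a96a H rest frames F R u₀ e ret s_10a9be :=
      seg8_core_carry hcore w_rip w_rsp (w_kept.get .rbp rfl) (w_kept.get .r14 rfl) hs (Nat.le_of_eq hremA)
        (ProgX.Base.conv_code_in w_eq) habi he_room he_top hcur.2.2
    have hlz1 : LZOK s_10a9be.mem F.pv := by
      apply hlz.sameExcept hs0 (by omega)
      intro w hw
      have e := List.mem_singleton.mp hw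
      rw [e]
      simp only
      omega
    have hkept : SavedImage.ImageDesc.Height s_10a9be.mem (v.reg .r12).toNat =
        SavedImage.ImageDesc.Height v.mem (v.reg .r12).toNat := by
      apply seg8_height_kept hs0 _ (by omega)
      intro w hw
      have e := List.mem_singleton.mp hw
      rw [e]
      simp only
      omega
    have hr13 : (s_10a9be.reg .r13).toNat = (v.reg .r13).toNat + jump := by
      rw [w_r13, ProgX.toNat_ofBV32, BitVec.toNat_add, ProgX.toNat_part32, BitVec.toNat_ofNat]
      omega
    refine ReachVia.done (Or.inl ⟨_, ?_, ⟨⟨hcore1, hregion, hgif, hpv, hinvA, hokA⟩, hlz1, ?_, ?_⟩, ?_, hpass_pos, ?_, rfl⟩)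
    · rw [w_kept.get .r12 rfl, hkept, hr13, ← hrow]
      omega
    · rw [w_kept.get .r12 rfl]
      exact hlast0
    · rw [hremA]
      exact hlt
    · rw [w_kept.get .r15 rfl]
      exact hpass
    · rw [hr13]
      omega

end Gif.Spec.DGifSlurp_8
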